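-- pv_equiv track=rewrite | github.com/huiyiz/11611-nlp-qa | QG/src/utils.py | map_answer_ids_to_words
-- ===== SOURCE A (Python) =====
-- def map_answer_ids_to_words(answer_ids_list, words_ids_list, words_mapping, words_list):
--     text_answer_list = []
--     for ans in answer_ids_list:
--         ans_length = len(ans)
--         for i in range(len(words_ids_list) - ans_length + 1):
--             if words_ids_list[i:i+len(ans)] == ans:
--                 corresponding_words = words_mapping[i:i+len(ans)]
--                 corresponding_words = sorted(set(corresponding_words), key=corresponding_words.index)
--                 text_ans = ""
--                 for w in corresponding_words:
--                     text_ans += ' ' + words_list[w]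
--                 text_answer_list.append(text_ans[1:])
--     return text_answer_list
-- ===== SOURCE B (Python) =====
-- def map_answer_ids_to_words(answer_ids_list, words_ids_list, words_mapping, words_list):
--     # Index each word id to its (increasing) list of positions once, so each answer
--     # only probes the positions where its first id occurs instead of scanning all of
--     # words_ids_list for every answer.
--     index = {}
--     for pos, wid in enumerate(words_ids_list):
--         index.setdefault(wid, []).append(pos)
--     n = len(words_ids_list)
--     out = []
--     for ans in answer_ids_list:
--         m = len(ans)
--         candidates = range(n + 1) if m == 0 else index.get(ans[0], [])
--         for i in candidates:
--             if words_ids_list[i:i+m] == ans: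
--                 uniq = dict.fromkeys(words_mapping[i:i+m])
--                 out.append(' '.join(words_list[w] for w in uniq))
--     return out
-- ===== Notes on version B (the rewrite author's own statement) =====
-- stated objective: alternative
-- what changed: B builds a hash index from word id to its positions once and, per answer, verifies only the positions where the answer's first id occurs (deduplicating via dict.fromkeys and joining with ' '.join), instead of A's scan of every window of words_ids_list per answer with sorted(set(...), key=.index).
import Mathlib
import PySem

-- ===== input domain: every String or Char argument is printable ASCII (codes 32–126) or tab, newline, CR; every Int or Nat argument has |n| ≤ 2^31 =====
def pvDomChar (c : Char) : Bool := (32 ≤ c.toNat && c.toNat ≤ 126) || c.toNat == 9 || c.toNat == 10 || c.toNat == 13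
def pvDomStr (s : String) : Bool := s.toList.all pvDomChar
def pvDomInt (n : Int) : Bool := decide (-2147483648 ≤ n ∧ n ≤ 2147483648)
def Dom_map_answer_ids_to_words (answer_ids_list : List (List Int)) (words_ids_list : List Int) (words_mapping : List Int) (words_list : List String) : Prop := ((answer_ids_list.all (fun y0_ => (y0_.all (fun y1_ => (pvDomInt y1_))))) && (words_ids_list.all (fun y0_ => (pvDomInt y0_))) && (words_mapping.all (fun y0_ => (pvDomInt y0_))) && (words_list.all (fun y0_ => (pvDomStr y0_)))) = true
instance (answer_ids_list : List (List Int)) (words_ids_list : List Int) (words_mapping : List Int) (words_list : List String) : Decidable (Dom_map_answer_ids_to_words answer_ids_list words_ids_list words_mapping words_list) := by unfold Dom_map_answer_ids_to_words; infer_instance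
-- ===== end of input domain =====

-- ===== PORT A =====
-- B replaces A's per-answer scan of every window with a position index keyed by the
-- answer's first id, probing only positions where that id occurs (objective: alternative).
def map_answer_ids_to_words (answer_ids_list : List (List Int)) (words_ids_list : List Int) (words_mapping : List Int) (words_list : List String) : List String :=
  answer_ids_list.foldl (fun text_answer_list ans =>
    (PySem.List.pyRange 0 ((words_ids_list.length : Int) - (ans.length : Int) + 1)).foldl
      (fun text_answer_list i =>
        if PySem.List.slice words_ids_list (some i) (some (i + (ans.length : Int))) == ans then
          let corresponding_words := PySem.List.slice words_mapping (some i) (some (i + (ans.length : Int)))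
          let sorted_words := PySem.List.sorted (PySem.Set.ofList corresponding_words)
              (fun w => (PySem.List.index? corresponding_words w).getD 0)
          let text_ans := sorted_words.foldl
              (fun text_ans w => text_ans ++ " " ++ (PySem.List.pyGet? words_list w).getD "") ""
          text_answer_list ++ [PySem.Str.slice text_ans (some 1) none]
        else text_answer_list)
      text_answer_list) []

-- ===== PORT B =====
def map_answer_ids_to_words_alt (answer_ids_list : List (List Int)) (words_ids_list : List Int) (words_mapping : List Int) (words_list : List String) : List String :=
  let index : PySem.Dict Int (List Int) :=
    (PySem.List.enumerate words_ids_list).foldl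
      (fun d p => d.modify p.2 [] (fun l => l ++ [p.1])) PySem.Dict.empty
  let n : Int := words_ids_list.length
  answer_ids_list.foldl (fun out ans =>
    let candidates : List Int :=
      match ans with
      | [] => PySem.List.pyRange 0 (n + 1)
      | a0 :: _ => index.getD a0 []
    candidates.foldl (fun out i =>
      if PySem.List.slice words_ids_list (some i) (some (i + (ans.length : Int))) == ans then
        let uniq := PySem.List.dedup (PySem.List.slice words_mapping (some i) (some (i + (ans.length : Int))))
        out ++ [PySem.Str.join " " (uniq.map (fun w => (PySem.List.pyGet? words_list w).getD ""))]
      else out) out) []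

-- ===== PRECONDITION & SPEC =====
-- Pre_ excludes exactly the inputs on which Python A raises IndexError: some answer occurs
-- in words_ids_list at a position whose words_mapping slice holds an out-of-range word index.
def Pre_map_answer_ids_to_words (answer_ids_list : List (List Int)) (words_ids_list : List Int) (words_mapping : List Int) (words_list : List String) : Prop :=
  ∀ ans ∈ answer_ids_list, ∀ k ∈ List.range (words_ids_list.length + 1),
    (words_ids_list.drop k).take ans.length = ans →
      ∀ w ∈ (words_mapping.drop k).take ans.length, PySem.Raise.InRange words_list.length w
instance (answer_ids_list : List (List Int)) (words_ids_list : List Int) (words_mapping : List Int) (words_list : List String) : Decidable (Pre_map_answer_ids_to_words answer_ids_list words_ids_list words_mapping words_list) := by unfold Pre_map_answer_ids_to_words; infer_instance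
def pvWitness_map_answer_ids_to_words : List (List Int) × List Int × List Int × List String := ([[1]], [1, 2], [0, 1], ["a", "b"])

def Spec_map_answer_ids_to_words (answer_ids_list : List (List Int)) (words_ids_list : List Int) (words_mapping : List Int) (words_list : List String) (out : List String) : Prop := out = map_answer_ids_to_words_alt answer_ids_list words_ids_list words_mapping words_list
instance (answer_ids_list : List (List Int)) (words_ids_list : List Int) (words_mapping : List Int) (words_list : List String) (out : List String) : Decidable (Spec_map_answer_ids_to_words answer_ids_list words_ids_list words_mapping words_list out) := by unfold Spec_map_answer_ids_to_words; infer_instance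

-- ===== CLAIM (what is proved, stated in full; the proofs are below) =====
def Claim_equal_map_answer_ids_to_words : Prop := ∀ (answer_ids_list : List (List Int)) (words_ids_list : List Int) (words_mapping : List Int) (words_list : List String), Dom_map_answer_ids_to_words answer_ids_list words_ids_list words_mapping words_list → Pre_map_answer_ids_to_words answer_ids_list words_ids_list words_mapping words_list → Spec_map_answer_ids_to_words answer_ids_list words_ids_list words_mapping words_list (map_answer_ids_to_words answer_ids_list words_ids_list words_mapping words_list)

-- ===== LEMMAS AND PROOFS =====

lemma mem_enum (xs : List Int) (s : Int) (p : Int × Int) :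
    p ∈ PySem.List.enumerate xs s ↔ ∃ k : Nat, k < xs.length ∧ p = (s + (k : Int), xs[k]!) := by
  induction xs generalizing s with
  | nil => simp [PySem.List.enumerate]
  | cons x t ih =>
    rw [show PySem.List.enumerate (x :: t) s = (s, x) :: PySem.List.enumerate t (s + 1) from rfl]
    simp only [List.mem_cons, ih, List.length_cons]
    constructor
    · rintro (rfl | ⟨k, hk, rfl⟩)
      · exact ⟨0, by simp⟩
      · refine ⟨k + 1, by omega, ?_⟩
        simp only [List.getElem!_cons_succ, Prod.mk.injEq]
        constructor
        · push_cast; ring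
        · trivial
    · rintro ⟨k, hk, rfl⟩
      cases k with
      | zero => left; simp
      | succ k =>
          right
          refine ⟨k, by omega, ?_⟩
          simp only [List.getElem!_cons_succ, Prod.mk.injEq]
          constructor
          · push_cast; ring
          · trivial

lemma pairwise_enum (xs : List Int) (s : Int) :
    List.Pairwise (fun p q => p.1 < q.1) (PySem.List.enumerate xs s) := by
  induction xs generalizing s with
  | nil => simp [PySem.List.enumerate]
  | cons x t ih =>
    rw [show PySem.List.enumerate (x :: t) s = (s, x) :: PySem.List.enumerate t (s + 1) from rfl]
    refine List.Pairwise.cons ?_ (ih (s + 1))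
    intro q hq
    rcases (mem_enum t (s + 1) q).mp hq with ⟨k, hk, rfl⟩
    simp; omega

lemma index_getD (wids : List Int) (a0 : Int) :
    ((PySem.List.enumerate wids).foldl (fun d p => d.modify p.2 [] (fun l => l ++ [p.1]))
        PySem.Dict.empty).getD a0 []
      = ((PySem.List.enumerate wids).filter (fun p => p.2 == a0)).map (fun p => p.1) := by
  rw [← List.foldl_map (f := fun (p : Int × Int) => (p.2, p.1))
        (g := fun (d : PySem.Dict Int (List Int)) (q : Int × Int) => d.modify q.1 [] (fun l => l ++ [q.2])),
      PySem.Dict.getD_foldl_modify_append]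
  simp [List.filter_map, Function.comp_def]

-- any match of (a0 :: tl) at position k lies in range and starts with a0
lemma match_decode (wids : List Int) (a0 : Int) (tl : List Int) (k : Nat)
    (h : (wids.drop k).take (tl.length + 1) = a0 :: tl) :
    k + tl.length + 1 ≤ wids.length ∧ wids[k]! = a0 := by
  have hlen := congrArg List.length h
  simp [List.length_take, List.length_drop] at hlen
  have hk : k + tl.length + 1 ≤ wids.length := by omega
  refine ⟨hk, ?_⟩
  have hh := congrArg List.head? h
  rw [List.head?_take, List.head?_drop] at hh
  simp at hh
  rw [List.getElem?_eq_getElem (by omega)] at hh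
  rw [getElem!_pos wids k (by omega)]
  exact Option.some.inj hh

lemma occ_lists_eq (wids : List Int) (a0 : Int) (tl : List Int) :
    (PySem.List.pyRange 0 ((wids.length : Int) - ((a0 :: tl).length : Int) + 1)).filter
        (fun i => PySem.List.slice wids (some i) (some (i + ((a0 :: tl).length : Int))) == a0 :: tl)
      = (((PySem.List.enumerate wids).filter (fun p => p.2 == a0)).map (fun p => p.1)).filter
        (fun i => PySem.List.slice wids (some i) (some (i + ((a0 :: tl).length : Int))) == a0 :: tl) := by
  set P : Int → Bool := fun i => PySem.List.slice wids (some i) (some (i + ((a0 :: tl).length : Int))) == a0 :: tl with hPdef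
  have hP : ∀ k : Nat, P (k : Int) = true ↔ (wids.drop k).take (tl.length + 1) = a0 :: tl := by
    intro k
    have hcast : ((k : Int) + ((a0 :: tl).length : Int)) = ((k + (tl.length + 1) : Nat) : Int) := by
      push_cast [List.length_cons]; ring
    rw [hPdef]
    simp only [hcast, PySem.List.slice_natCast, beq_iff_eq, Nat.add_sub_cancel_left]
  -- sortedness of both sides
  have SA : List.Pairwise (· < ·) (PySem.List.pyRange 0 ((wids.length : Int) - ((a0 :: tl).length : Int) + 1)) := by
    by_cases hb : ((wids.length : Int) - ((a0 :: tl).length : Int) + 1) ≤ 0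
    · have : PySem.List.pyRange 0 ((wids.length : Int) - ((a0 :: tl).length : Int) + 1) = [] := by
        rw [List.eq_nil_iff_forall_not_mem]
        intro x hx
        rw [PySem.List.mem_pyRange_one] at hx
        omega
      rw [this]; exact List.Pairwise.nil
    · push Not at hb
      have hb' : ((wids.length : Int) - ((a0 :: tl).length : Int) + 1)
          = (((wids.length : Int) - ((a0 :: tl).length : Int) + 1).toNat : Int) := by omega
      rw [hb', PySem.List.pyRange_zero_natCast, List.pairwise_map]
      exact (List.pairwise_lt_range).imp (by intro a b h; exact_mod_cast h)
  have SC : List.Pairwise (· < ·)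
      (((PySem.List.enumerate wids).filter (fun p => p.2 == a0)).map (fun p => p.1)) := by
    rw [List.pairwise_map]
    exact (pairwise_enum wids 0).filter _
  have hperm : (PySem.List.pyRange 0 ((wids.length : Int) - ((a0 :: tl).length : Int) + 1)).filter P
      |>.Perm ((((PySem.List.enumerate wids).filter (fun p => p.2 == a0)).map (fun p => p.1)).filter P) := by
    refine (List.perm_ext_iff_of_nodup ((SA.filter P).imp ?_) ((SC.filter P).imp ?_)).mpr ?_
    · exact fun h => ne_of_lt h
    · exact fun h => ne_of_lt h
    intro i
    simp only [List.mem_filter, List.mem_map, PySem.List.mem_pyRange_one, List.mem_filter]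
    constructor
    · rintro ⟨⟨h0, hlt⟩, hp⟩
      have hk : i = ((i.toNat : Nat) : Int) := by omega
      have hmatch := (hP i.toNat).mp (by rw [← hk]; exact hp)
      have hd := match_decode wids a0 tl i.toNat hmatch
      refine ⟨⟨(i, wids[i.toNat]!), ⟨?_, ?_⟩, rfl⟩, hp⟩
      · rw [mem_enum]
        exact ⟨i.toNat, by omega, by simp; omega⟩
      · simp [hd.2]
    · rintro ⟨⟨p, ⟨hpmem, hpa⟩, rfl⟩, hp⟩
      rcases (mem_enum wids 0 p).mp hpmem with ⟨k, hk, rfl⟩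
      simp only [zero_add] at hp ⊢
      have hmatch := (hP k).mp hp
      have hd := match_decode wids a0 tl k hmatch
      refine ⟨⟨by positivity, ?_⟩, hp⟩
      simp only [List.length_cons]
      omega
  exact List.Perm.eq_of_pairwise (le := (· ≤ ·)) (fun a b _ _ h1 h2 => le_antisymm h1 h2)
    ((SA.filter P).imp le_of_lt) ((SC.filter P).imp le_of_lt) hperm

lemma idx_pos_of_mem_ne (x b : Int) (xs : List Int) (hb : b ∈ xs) (hne : b ≠ x) :
    ∃ j : Nat, List.idxOf? b (x :: xs) = some (j + 1) ∧ List.idxOf? b xs = some j := by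
  have hs : (List.idxOf? b xs).isSome = true := List.isSome_idxOf?.mpr hb
  rcases Option.isSome_iff_exists.mp hs with ⟨j, hj⟩
  refine ⟨j, ?_, hj⟩
  rw [List.idxOf?_cons]
  simp [hj, (by simpa [eq_comm] using hne : ¬ x = b)]

lemma pairwise_index_ofList (cw : List Int) :
    List.Pairwise (fun a b => (PySem.List.index? cw a).getD 0 < (PySem.List.index? cw b).getD 0)
      (PySem.Set.ofList cw) := by
  induction cw with
  | nil => simp [PySem.Set.ofList]
  | cons x xs ih =>
    rw [PySem.Set.ofList_cons]
    refine List.Pairwise.cons ?_ ?_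
    · intro b hb
      have hbx : b ∈ PySem.Set.ofList xs ∧ b ≠ x := by
        simpa using (PySem.Set.mem_discard (PySem.Set.ofList xs) x b).mp hb
      have hbmem : b ∈ xs := (PySem.Set.mem_ofList xs b).mp hbx.1
      rcases idx_pos_of_mem_ne x b xs hbmem hbx.2 with ⟨j, hj, _⟩
      show (PySem.List.index? (x :: xs) x).getD 0 < (PySem.List.index? (x :: xs) b).getD 0
      unfold PySem.List.index?
      rw [List.idxOf?_cons]
      simp [hj]
    · have hsub : (PySem.Set.ofList xs).discard x =
          (PySem.Set.ofList xs).filter (fun y => !(y == x)) := rfl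
      have hpw : List.Pairwise (fun a b => (PySem.List.index? xs a).getD 0 < (PySem.List.index? xs b).getD 0)
          ((PySem.Set.ofList xs).discard x) := by
        rw [hsub]; exact ih.filter _
      refine hpw.imp_of_mem ?_
      intro a b ha hb hab
      have hax : a ∈ xs ∧ a ≠ x := by
        have := (PySem.Set.mem_discard (PySem.Set.ofList xs) x a).mp ha
        exact ⟨(PySem.Set.mem_ofList xs a).mp this.1, this.2⟩
      have hbx : b ∈ xs ∧ b ≠ x := by
        have := (PySem.Set.mem_discard (PySem.Set.ofList xs) x b).mp hb
        exact ⟨(PySem.Set.mem_ofList xs b).mp this.1, this.2⟩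
      rcases idx_pos_of_mem_ne x a xs hax.1 hax.2 with ⟨ja, hja, hja'⟩
      rcases idx_pos_of_mem_ne x b xs hbx.1 hbx.2 with ⟨jb, hjb, hjb'⟩
      show (PySem.List.index? (x :: xs) a).getD 0 < (PySem.List.index? (x :: xs) b).getD 0
      unfold PySem.List.index? at hab ⊢
      rw [hja, hjb]
      rw [hja', hjb'] at hab
      simpa using hab

lemma foldl_space_toList (ws : List String) (c : String) :
    (ws.foldl (fun s w => s ++ " " ++ w) c).toList
      = c.toList ++ (ws.map (fun w => ' ' :: w.toList)).flatten := by
  induction ws generalizing c with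
  | nil => simp
  | cons w t ih => simp [ih, List.append_assoc]

lemma intercalate_cons_flatten (sep : List Char) (a : List Char) (t : List (List Char)) :
    List.intercalate sep (a :: t) = a ++ (t.map (fun y => sep ++ y)).flatten := by
  induction t generalizing a with
  | nil => simp [List.intercalate]
  | cons b t ih =>
    have hb := ih b
    rw [List.intercalate] at hb
    rw [List.intercalate, List.intersperse_cons₂, List.flatten_cons, List.flatten_cons, hb]
    simp [List.append_assoc]

lemma drop_one_flatten_space (ls : List (List Char)) :
    (List.flatten (ls.map (fun l => ' ' :: l))).drop 1 = List.intercalate [' '] ls := by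
  cases ls with
  | nil => simp; rfl
  | cons a t =>
    rw [List.map_cons, List.flatten_cons, intercalate_cons_flatten]
    rfl

lemma fold_space_slice_eq_join (ws : List String) :
    PySem.Str.slice (ws.foldl (fun s w => s ++ " " ++ w) "") (some 1) none
      = PySem.Str.join " " ws := by
  rw [PySem.Str.slice, PySem.Str.join]
  congr 1
  have hcs : ∀ (s : List Char) (a b : Option Int), PySem.Chars.slice s a b = PySem.List.slice s a b :=
    fun _ _ _ => rfl
  rw [hcs, PySem.List.slice_from _ (by norm_num : (0:Int) ≤ 1)]
  rw [foldl_space_toList]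
  have hc : ("" : String).toList = [] := rfl
  have hsep : (" " : String).toList = [' '] := by decide
  rw [hc, List.nil_append, show ((1:Int).toNat) = 1 from rfl]
  have := drop_one_flatten_space (ws.map String.toList)
  rw [List.map_map] at this
  rw [show (fun w : String => ' ' :: w.toList) = ((fun l => ' ' :: l) ∘ String.toList) from rfl, this]
  rw [PySem.Chars.join, hsep]

-- A's 'sorted(set(cw), key=cw.index)' is set(cw) in first-insertion order
lemma sorted_set_index (cw : List Int) :
    PySem.List.sorted (PySem.Set.ofList cw) (fun w => (PySem.List.index? cw w).getD 0)
      = PySem.Set.ofList cw := by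
  apply PySem.List.sorted_eq_of_perm_of_pairwise_lt _ _ _ (List.Perm.refl _)
  exact pairwise_index_ofList cw

-- the two per-match strings agree
lemma string_build_eq (cw : List Int) (words_list : List String) :
    PySem.Str.slice
      ((PySem.List.sorted (PySem.Set.ofList cw) (fun w => (PySem.List.index? cw w).getD 0)).foldl
        (fun s w => s ++ " " ++ (PySem.List.pyGet? words_list w).getD "") "") (some 1) none
      = PySem.Str.join " " ((PySem.List.dedup cw).map (fun w => (PySem.List.pyGet? words_list w).getD "")) := by
  rw [sorted_set_index]
  rw [show (fun (s : String) w => s ++ " " ++ (PySem.List.pyGet? words_list w).getD "")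
        = (fun s w => (fun (s : String) (x : String) => s ++ " " ++ x) s ((fun w => (PySem.List.pyGet? words_list w).getD "") w)) from rfl]
  rw [← List.foldl_map]
  rw [fold_space_slice_eq_join]
  rfl

-- a fold that conditionally appends is determined by its filtered list and its item function
lemma fold_if_append_congr {a b : Type} (p : a → Bool) (fA fB : a → b) (l1 l2 : List a)
    (acc : List b) (h : l1.filter p = l2.filter p) (hf : ∀ i, fA i = fB i) :
    l1.foldl (fun out i => if p i then out ++ [fA i] else out) acc
      = l2.foldl (fun out i => if p i then out ++ [fB i] else out) acc := by
  rw [PySem.List.foldl_append_if, PySem.List.foldl_append_if, h,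
      List.map_congr_left (fun i _ => hf i)]

-- ===== VERDICT (by name: the statement is the Claim_ definition above) =====
set_option maxHeartbeats 1000000 in
theorem map_answer_ids_to_words_spec : Claim_equal_map_answer_ids_to_words := by
  intro answer_ids_list words_ids_list words_mapping words_list _ _
  unfold Spec_map_answer_ids_to_words
  simp only [map_answer_ids_to_words, map_answer_ids_to_words_alt]
  apply PySem.List.foldl_congr_mem
  intro acc ans _
  apply fold_if_append_congr
    (p := fun i => PySem.List.slice words_ids_list (some i) (some (i + (ans.length : Int))) == ans)
  · cases ans with
    | nil => norm_num
    | cons a0 tl =>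
        show _ = List.filter _
          (((PySem.List.enumerate words_ids_list).foldl
              (fun d p => d.modify p.2 [] fun l => l ++ [p.1]) PySem.Dict.empty).getD a0 [])
        rw [index_getD]
        exact occ_lists_eq words_ids_list a0 tl
  · exact fun i => string_build_eq _ _
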